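-- pv_equiv track=rewrite | github.com/yannickkiki/crypto | tp_funcs.py | enigma_decrypt_message
-- ===== SOURCE A (Python) =====
-- ALPHABET_SIZE=26
--
-- def reverse(string):
--     """reverse a string
--     Example: "abc"->"cba"
--     """
--     return string[::-1]
--
-- def enigma_decrypt_message(message_encrypted,mobile_anneau):
--     """decrypt a @messsage with enigma machine encryption using
--     @mobile_anneau"""
--     fixed_anneau="ABCDEFGHIJKLMNOPQRSTUVWXYZ"
--     message_encrypted_reversed=reverse(message_encrypted)
--     message_decrypted=""
--     for i,letter in enumerate(message_encrypted_reversed):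
--         message_decrypted=fixed_anneau[(mobile_anneau.find(letter)+i\
--                                         -(len(message_encrypted)-1))%ALPHABET_SIZE]+\
--     message_decrypted
--     return message_decrypted
-- ===== SOURCE B (Python) =====
-- def enigma_decrypt_message(message_encrypted, mobile_anneau):
--     """decrypt a @messsage with enigma machine encryption using
--     @mobile_anneau"""
--     fixed_anneau = "ABCDEFGHIJKLMNOPQRSTUVWXYZ"
--     return "".join(fixed_anneau[(mobile_anneau.find(ch) - j) % 26]
--                    for j, ch in enumerate(message_encrypted))
-- ===== Notes on version B (the rewrite author's own statement) =====
-- stated objective: faster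
-- what changed: B removes the reversal and the quadratic prepend loop: since i-(len-1) = -j for the original position j, it maps each character directly in one forward pass with (mobile_anneau.find(ch) - j) % 26 and joins the results.
import Mathlib
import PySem

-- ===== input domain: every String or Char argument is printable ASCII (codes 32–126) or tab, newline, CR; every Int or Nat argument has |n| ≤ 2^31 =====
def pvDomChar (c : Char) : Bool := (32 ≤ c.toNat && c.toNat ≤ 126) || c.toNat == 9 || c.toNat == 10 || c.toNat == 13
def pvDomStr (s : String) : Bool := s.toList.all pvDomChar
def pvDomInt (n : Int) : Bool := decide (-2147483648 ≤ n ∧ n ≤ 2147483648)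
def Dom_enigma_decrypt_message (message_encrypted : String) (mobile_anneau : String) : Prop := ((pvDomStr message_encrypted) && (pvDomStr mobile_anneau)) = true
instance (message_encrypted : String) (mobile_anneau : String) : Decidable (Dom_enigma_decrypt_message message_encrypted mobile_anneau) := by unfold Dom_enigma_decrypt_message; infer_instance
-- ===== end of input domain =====

-- B removes A's reversal+prepend pass: one forward map with index (find ch - j) % 26 — simpler, same values.


-- ===== PORT A =====
-- helper `reverse`: string[::-1]; slice? with step -1 is never none, .getD [] is unreachable
def pyReverse (s : List Char) : List Char :=
  (PySem.List.slice? s none none (-1)).getD []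

-- fixed_anneau[k]: k = _ % 26 is always in [0,26), so the IndexError branch is unreachable; default 'A'
def enigma_decrypt_message (message_encrypted : String) (mobile_anneau : String) : String :=
  let fixed_anneau : List Char := "ABCDEFGHIJKLMNOPQRSTUVWXYZ".toList
  let rev := pyReverse message_encrypted.toList
  let message_decrypted :=
    (PySem.List.enumerate rev 0).foldl
      (fun acc p =>
        PySem.List.pyGetD fixed_anneau
          (PySem.Int.mod
            (PySem.Chars.find mobile_anneau.toList [p.2] + p.1
              - (PySem.List.len message_encrypted.toList - 1)) 26) 'A' :: acc)
      []
  String.ofList message_decrypted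

-- ===== PORT B =====
def enigma_decrypt_message_alt (message_encrypted : String) (mobile_anneau : String) : String :=
  let fixed_anneau : List Char := "ABCDEFGHIJKLMNOPQRSTUVWXYZ".toList
  String.ofList
    ((PySem.List.enumerate message_encrypted.toList 0).map
      (fun p =>
        PySem.List.pyGetD fixed_anneau
          (PySem.Int.mod (PySem.Chars.find mobile_anneau.toList [p.2] - p.1) 26) 'A'))

-- ===== PRECONDITION & SPEC =====
def Spec_enigma_decrypt_message (message_encrypted : String) (mobile_anneau : String) (out : String) : Prop := out = enigma_decrypt_message_alt message_encrypted mobile_anneau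
instance (message_encrypted : String) (mobile_anneau : String) (out : String) : Decidable (Spec_enigma_decrypt_message message_encrypted mobile_anneau out) := by unfold Spec_enigma_decrypt_message; infer_instance

-- ===== CLAIM (what is proved, stated in full; the proofs are below) =====
def Claim_equal_enigma_decrypt_message : Prop := ∀ (message_encrypted : String) (mobile_anneau : String), Dom_enigma_decrypt_message message_encrypted mobile_anneau → Spec_enigma_decrypt_message message_encrypted mobile_anneau (enigma_decrypt_message message_encrypted mobile_anneau)

-- ===== LEMMAS AND PROOFS =====

-- A's prepend loop over an enumerated list, written as a map over the enumerated REVERSE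
-- (index s + l.length - 1 - position becomes the negated enumerate index starting at -s - l.length + 1).
theorem foldl_cons_enum_eq_map_rev_enum (F : Int → Char → Char) :
    ∀ (l : List Char) (s : Int) (acc : List Char),
      (PySem.List.enumerate l s).foldl (fun acc p => F p.1 p.2 :: acc) acc
        = (PySem.List.enumerate l.reverse (-s - l.length + 1)).map (fun p => F (-p.1) p.2) ++ acc := by
  intro l
  induction l with
  | nil => intro s acc; simp [PySem.List.enumerate_nil]
  | cons c t ih =>
    intro s acc
    rw [PySem.List.enumerate_cons]
    simp only [List.foldl_cons]
    rw [ih (s + 1) (F s c :: acc)]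
    have h1 : (c :: t).reverse = t.reverse ++ [c] := by simp
    rw [h1, PySem.List.enumerate_append]
    have h2 : (-s - ((c :: t).length : Int) + 1) = -(s + 1) - (t.length : Int) + 1 := by
      simp; ring
    rw [h2]
    have h3 : (-(s + 1) - (t.length : Int) + 1 + (t.reverse.length : Int)) = -s := by
      simp; ring
    rw [h3]
    simp [PySem.List.enumerate_cons, PySem.List.enumerate_nil]

-- congruence for maps over enumerations with shifted start indices
theorem map_enum_congr (f g : Int × Char → Char) :
    ∀ (xs : List Char) (s t : Int),
      (∀ (k : Nat) (c : Char), f (s + k, c) = g (t + k, c)) →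
      (PySem.List.enumerate xs s).map f = (PySem.List.enumerate xs t).map g := by
  intro xs
  induction xs with
  | nil => intro s t _; simp [PySem.List.enumerate_nil]
  | cons c rest ih =>
    intro s t h
    rw [PySem.List.enumerate_cons, PySem.List.enumerate_cons]
    simp only [List.map_cons]
    congr 1
    · have := h 0 c; simpa using this
    · exact ih (s + 1) (t + 1) (fun k ch => by
        have := h (k + 1) ch
        push_cast at this ⊢
        convert this using 3 <;> ring)

-- ===== VERDICT (by name: the statement is the Claim_ definition above) =====
theorem enigma_decrypt_message_spec : Claim_equal_enigma_decrypt_message := by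
  intro m a _
  show _ = _
  unfold enigma_decrypt_message enigma_decrypt_message_alt pyReverse
  rw [PySem.List.slice?_none_none_neg_one]
  simp only [Option.getD_some]
  rw [foldl_cons_enum_eq_map_rev_enum
        (fun i c =>
          PySem.List.pyGetD "ABCDEFGHIJKLMNOPQRSTUVWXYZ".toList
            (PySem.Int.mod
              (PySem.Chars.find a.toList [c] + i - (PySem.List.len m.toList - 1)) 26) 'A')
        m.toList.reverse 0 []]
  simp only [List.reverse_reverse, List.append_nil, List.length_reverse]
  congr 1
  apply map_enum_congr
  intro k c
  congr 2
  simp [PySem.List.len_eq]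
  ring
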